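-- pv_equiv track=rewrite | github.com/Mintenance-LTD/mintenance | Building Defect Detection 7.v2i.yolov11/normalize_labels.py | build_names_and_remap
-- ===== SOURCE A (Python) =====
-- from typing import Dict, List, Tuple
--
-- def normalize_label_name(raw: str) -> str:
-- 	"""
-- 	Conservative normalization:
-- 	- lower-case
-- 	- spaces and hyphens -> underscore
-- 	- keep original tokens otherwise
-- 	- unify simple case/format variants only (no semantic merges)
-- 	"""
-- 	name = raw.strip().lower()
-- 	name = name.replace("-", " ").replace("_", " ")
-- 	name = " ".join(name.split())  # collapse spaces
-- 	name = name.replace(" ", "_")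
--
-- 	# Specific safe normalizations for obvious variants
-- 	safe_aliases = {
-- 		"damaged_roof": {"damaged_roof", "damagedroof", "damaged__roof"},
-- 		"wall_leaking": {"wall_leaking", "wall-leaking", "wall__leaking"},
-- 		"broken_window": {"broken_window", "brokenwindow"},
-- 		"building": {"building"},
-- 		"roof": {"roof"},
-- 		"window": {"window"},
-- 		"crack": {"crack"},
-- 		"damage": {"damage"},
-- 	}
-- 	for canonical, variants in safe_aliases.items():
-- 		if name in variants:
-- 			return canonical
-- 	return name
--
-- def build_names_and_remap(old_names: List[str]) -> Tuple[List[str], Dict[int, int]]: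
-- 	seen: Dict[str, int] = {}
-- 	new_names: List[str] = []
-- 	remap: Dict[int, int] = {}
-- 	for old_idx, name in enumerate(old_names):
-- 		norm = normalize_label_name(name)
-- 		if norm not in seen:
-- 			seen[norm] = len(new_names)
-- 			new_names.append(norm)
-- 		remap[old_idx] = seen[norm]
-- 	return new_names, remap
-- ===== SOURCE B (Python) =====
-- from typing import Dict, List, Tuple
--
-- def normalize_label_name(raw: str) -> str:
-- 	name = raw.strip().lower()
-- 	name = name.replace("-", " ").replace("_", " ")
-- 	name = " ".join(name.split())  # collapse spaces
-- 	name = name.replace(" ", "_")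
-- 	safe_aliases = {
-- 		"damaged_roof": {"damaged_roof", "damagedroof", "damaged__roof"},
-- 		"wall_leaking": {"wall_leaking", "wall-leaking", "wall__leaking"},
-- 		"broken_window": {"broken_window", "brokenwindow"},
-- 		"building": {"building"},
-- 		"roof": {"roof"},
-- 		"window": {"window"},
-- 		"crack": {"crack"},
-- 		"damage": {"damage"},
-- 	}
-- 	for canonical, variants in safe_aliases.items():
-- 		if name in variants:
-- 			return canonical
-- 	return name
--
-- def build_names_and_remap(old_names: List[str]) -> Tuple[List[str], Dict[int, int]]:
-- 	# Positional formulation, no dict/set needed: a name's new index is the number of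
-- 	# first-occurrence positions strictly before its own first occurrence.
-- 	norms = [normalize_label_name(n) for n in old_names]
-- 	first = [norms.index(nm) for nm in norms]
-- 	new_names = [nm for i, nm in enumerate(norms) if first[i] == i]
-- 	remap = {i: sum(1 for j in range(first[i]) if first[j] == j)
-- 	         for i in range(len(norms))}
-- 	return new_names, remap
-- ===== Notes on version B (the rewrite author's own statement) =====
-- stated objective: alternative
-- what changed: Replaces A's hash-based running seen-dict with a purely positional algorithm: first[i] = norms.index(norms[i]) (first-occurrence scan), new_names keeps the positions where first[i] == i, and remap[i] counts the first-occurrence positions strictly before first[i]; no dictionary or set is maintained at all.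
import Mathlib
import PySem

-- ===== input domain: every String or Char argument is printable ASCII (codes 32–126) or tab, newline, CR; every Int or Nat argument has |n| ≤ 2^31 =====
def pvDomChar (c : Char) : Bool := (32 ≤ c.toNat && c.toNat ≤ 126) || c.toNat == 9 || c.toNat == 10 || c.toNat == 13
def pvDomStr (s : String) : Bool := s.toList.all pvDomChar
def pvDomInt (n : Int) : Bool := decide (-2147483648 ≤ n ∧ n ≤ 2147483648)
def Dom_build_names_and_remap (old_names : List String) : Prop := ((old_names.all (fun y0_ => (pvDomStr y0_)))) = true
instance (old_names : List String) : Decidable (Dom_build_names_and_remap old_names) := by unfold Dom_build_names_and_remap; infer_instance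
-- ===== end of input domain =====

-- B replaces A's running seen-dict with a purely positional algorithm: first-occurrence
-- indices via list scans (norms.index) and counting, no dictionary/set maintained at all.

-- ===== PORT A =====
-- shared helper: port of normalize_label_name (both Python versions contain this identical helper)
def safeAliases : List (String × PySem.Set String) :=
  [ ("damaged_roof", PySem.Set.ofList ["damaged_roof", "damagedroof", "damaged__roof"]),
    ("wall_leaking", PySem.Set.ofList ["wall_leaking", "wall-leaking", "wall__leaking"]),
    ("broken_window", PySem.Set.ofList ["broken_window", "brokenwindow"]),
    ("building", PySem.Set.ofList ["building"]),
    ("roof", PySem.Set.ofList ["roof"]),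
    ("window", PySem.Set.ofList ["window"]),
    ("crack", PySem.Set.ofList ["crack"]),
    ("damage", PySem.Set.ofList ["damage"]) ]

def normalize_label_name (raw : String) : String :=
  let name := PySem.Str.lower (PySem.Str.strip raw)
  let name := PySem.Str.replace (PySem.Str.replace name "-" " ") "_" " "
  let name := PySem.Str.join " " (PySem.Str.split₀ name)
  let name := PySem.Str.replace name " " "_"
  -- the for-loop returning the first canonical whose variants contain name
  match safeAliases.find? (fun p => PySem.Set.contains p.2 name) with
  | some p => p.1
  | none => name

-- one step of A's loop; state = (seen, new_names, remap)
def aStep (st : PySem.Dict String Int × List String × PySem.Dict Int Int) (p : Int × String) :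
    PySem.Dict String Int × List String × PySem.Dict Int Int :=
  if st.1.contains (normalize_label_name p.2) then
    -- seen[norm] exists here, so getD is exact for Python's seen[norm]
    (st.1, st.2.1, st.2.2.insert p.1 (st.1.getD (normalize_label_name p.2) 0))
  else
    (st.1.insert (normalize_label_name p.2) (st.2.1.length : Int),
      st.2.1 ++ [normalize_label_name p.2],
      st.2.2.insert p.1
        ((st.1.insert (normalize_label_name p.2) (st.2.1.length : Int)).getD
          (normalize_label_name p.2) 0))

def build_names_and_remap (old_names : List String) : List String × (List (Int × Int)) :=
  let st := (PySem.List.enumerate old_names).foldl aStep (PySem.Dict.empty, [], PySem.Dict.empty)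
  (st.2.1, st.2.2.items)

-- ===== PORT B =====
def build_names_and_remap_alt (old_names : List String) : List String × (List (Int × Int)) :=
  let norms := old_names.map normalize_label_name
  -- norms.index(nm): every nm is an element of norms, so `.getD 0` is exact for Python's .index
  let first : List Int := norms.map (fun nm => (((PySem.List.index? norms nm).getD 0 : Nat) : Int))
  let new_names := ((PySem.List.enumerate norms).filter
      (fun p => PySem.List.pyGetD first p.1 0 == p.1)).map (fun p => p.2)
  -- {i: sum(1 for j in range(first[i]) if first[j] == j) for i in range(len(norms))}
  let remap := (PySem.List.pyRange 0 (PySem.List.len norms) 1).foldl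
      (fun (d : PySem.Dict Int Int) i =>
        d.insert i ((PySem.List.pyRange 0 (PySem.List.pyGetD first i 0) 1).foldl
          (fun acc j => if PySem.List.pyGetD first j 0 == j then acc + 1 else acc) (0 : Int)))
      PySem.Dict.empty
  (new_names, remap.items)

-- ===== PRECONDITION & SPEC =====
def Spec_build_names_and_remap (old_names : List String) (out : List String × (List (Int × Int))) : Prop := out = build_names_and_remap_alt old_names
instance (old_names : List String) (out : List String × (List (Int × Int))) : Decidable (Spec_build_names_and_remap old_names out) := by unfold Spec_build_names_and_remap; infer_instance

-- ===== CLAIM (what is proved, stated in full; the proofs are below) =====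
def Claim_equal_build_names_and_remap : Prop := ∀ (old_names : List String), Dom_build_names_and_remap old_names → Spec_build_names_and_remap old_names (build_names_and_remap old_names)

-- ===== LEMMAS AND PROOFS =====

-- Set.add keeps membership
lemma mem_add_of_mem {n m : String} {s : PySem.Set String} (h : n ∈ s) : n ∈ PySem.Set.add s m := by
  simp [PySem.Set.add]; split <;> simp [h]

-- first-occurrence index is stable as the dedup list grows by appends
lemma idxOf_foldl_add_of_mem {n : String} (t : List String) (s : PySem.Set String) (h : n ∈ s) :
    (t.foldl PySem.Set.add s).idxOf n = s.idxOf n := by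
  induction t generalizing s with
  | nil => rfl
  | cons m t ih =>
    show (t.foldl PySem.Set.add (PySem.Set.add s m)).idxOf n = s.idxOf n
    rw [ih _ (mem_add_of_mem h)]
    simp only [PySem.Set.add]
    split
    · rfl
    · exact List.idxOf_append_of_mem h

lemma idxOf_append_self {l : List String} {a : String} (h : a ∉ l) :
    (l ++ [a]).idxOf a = l.length := by
  rw [List.idxOf_append]
  simp [List.idxOf_eq_length_iff.2 h]

-- the invariant of A's loop, run over any suffix from a consistent state
lemma aLoop_inv (xs : List String) (i : Int) (seen : PySem.Dict String Int)
    (new : List String) (remap : PySem.Dict Int Int)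
    (hnd : new.Nodup)
    (hseen : ∀ n, seen.get? n = if n ∈ new then some (new.idxOf n : Int) else none)
    (hkeys : ∀ k ∈ remap.keys, k < i) :
    ((PySem.List.enumerate xs i).foldl aStep (seen, new, remap)).2.1
        = (xs.map normalize_label_name).foldl PySem.Set.add new
    ∧ ((PySem.List.enumerate xs i).foldl aStep (seen, new, remap)).2.2.items
        = remap.items ++ (PySem.List.enumerate (xs.map normalize_label_name) i).map
            (fun p => (p.1, (((xs.map normalize_label_name).foldl PySem.Set.add new).idxOf p.2 : Int))) := by
  induction xs generalizing i seen new remap with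
  | nil => simp [PySem.List.enumerate_nil]
  | cons x xs ih =>
    rw [PySem.List.enumerate_cons, List.foldl_cons, List.map_cons, List.foldl_cons,
      PySem.List.enumerate_cons, List.map_cons]
    generalize hg : normalize_label_name x = nm
    have hg' : normalize_label_name (i, x).2 = nm := hg
    have hni : remap.contains i = false := by
      by_cases h : remap.contains i
      · exact absurd (lt_irrefl i (hkeys i ((PySem.Dict.contains_iff_mem_keys remap i).mp h)))
          (by simp)
      · simpa using h
    simp only [aStep, hg']
    by_cases hmem : nm ∈ new
    · have hc : seen.contains nm = true := by
        rw [PySem.Dict.contains_eq_isSome_get?, hseen]; simp [hmem]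
      rw [if_pos hc]
      have hv : seen.getD nm 0 = (new.idxOf nm : Int) := by
        rw [PySem.Dict.getD_eq_get?_getD, hseen]; simp [hmem]
      have hadd : PySem.Set.add new nm = new := by
        simp [PySem.Set.add, PySem.Set.contains, hmem]
      rw [hv, hadd]
      obtain ⟨h1, h2⟩ := ih (i + 1) seen new
        (remap.insert i (new.idxOf nm : Int)) hnd hseen
        (by intro k hk
            rcases (PySem.Dict.mem_keys_insert remap i k _).mp hk with h | h
            · omega
            · have := hkeys k h; omega)
      refine ⟨h1, ?_⟩
      rw [h2, PySem.Dict.items_insert_of_not_contains remap _ hni,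
        idxOf_foldl_add_of_mem _ _ hmem]
      simp
    · have hc : seen.contains nm = false := by
        rw [PySem.Dict.contains_eq_isSome_get?, hseen]; simp [hmem]
      rw [if_neg (by simp [hc])]
      have hv : (seen.insert nm (new.length : Int)).getD nm 0 = (new.length : Int) := by
        rw [PySem.Dict.getD_eq_get?_getD, PySem.Dict.get?_insert_self]; rfl
      have hadd : PySem.Set.add new nm = new ++ [nm] := by
        simp [PySem.Set.add, PySem.Set.contains, hmem]
      rw [hv, hadd]
      have hnd' : (new ++ [nm]).Nodup := by
        have hdisj : ∀ a ∈ new, ¬ a = nm := fun a ha h => hmem (h ▸ ha)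
        simp [List.nodup_append, hnd]
        exact hdisj
      have hseen' : ∀ n, (seen.insert nm (new.length : Int)).get? n =
          if n ∈ new ++ [nm] then some (((new ++ [nm]).idxOf n : Nat) : Int) else none := by
        intro n
        by_cases hn : n = nm
        · subst hn
          rw [PySem.Dict.get?_insert_self]
          simp [idxOf_append_self hmem]
        · rw [PySem.Dict.get?_insert_of_ne _ _ hn, hseen]
          by_cases hn' : n ∈ new
          · simp [hn', List.mem_append, List.idxOf_append_of_mem hn']
          · simp [hn', hn]
      obtain ⟨h1, h2⟩ := ih (i + 1) _ (new ++ [nm])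
        (remap.insert i (new.length : Int)) hnd' hseen'
        (by intro k hk
            rcases (PySem.Dict.mem_keys_insert remap i k _).mp hk with h | h
            · omega
            · have := hkeys k h; omega)
      refine ⟨h1, ?_⟩
      rw [h2, PySem.Dict.items_insert_of_not_contains remap _ hni,
        idxOf_foldl_add_of_mem _ _ (by simp : nm ∈ new ++ [nm]),
        idxOf_append_self hmem]
      simp

-- B's .index(nm) computes idxOf for a member
lemma index?_getD_eq_idxOf (L : List String) (x : String) (h : x ∈ L) :
    (PySem.List.index? L x).getD 0 = L.idxOf x := by
  induction L with
  | nil => simp at h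
  | cons y t ih =>
    by_cases hy : y = x
    · subst hy; rw [PySem.List.index?_cons_self]; simp
    · have hx : x ∈ t := by
        rcases List.mem_cons.mp h with h1 | h1
        · exact absurd h1.symm hy
        · exact h1
      rw [PySem.List.index?_cons_of_ne t hy]
      obtain ⟨k, hk⟩ := Option.isSome_iff_exists.mp ((PySem.List.index?_isSome_iff t x).mpr hx)
      rw [hk]
      have := ih hx
      rw [hk] at this
      simp [hy, ← this]

-- B's first list, rewritten with idxOf
lemma first_eq (L : List String) :
    L.map (fun nm => (((PySem.List.index? L nm).getD 0 : Nat) : Int))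
      = L.map (fun nm => ((L.idxOf nm : Nat) : Int)) := by
  apply List.map_congr_left
  intro x hx
  rw [index?_getD_eq_idxOf L x hx]

-- first[k] as a value, for an in-range Nat index
lemma first_getD (L : List String) (k : Nat) (hk : k < L.length) :
    PySem.List.pyGetD (L.map (fun nm => ((L.idxOf nm : Nat) : Int))) (k : Int) 0
      = ((L.idxOf L[k] : Nat) : Int) := by
  rw [PySem.List.pyGetD_natCast]
  rw [List.getD_eq_getElem _ _ (by simpa using hk)]
  simp

-- if an element occurs in the length-f prefix, its first index is below f
lemma idxOf_lt_of_mem_take (L : List String) (x : String) (f : Nat) (h : x ∈ L.take f) :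
    L.idxOf x < f := by
  conv_lhs => rw [← List.take_append_drop f L]
  rw [List.idxOf_append_of_mem h]
  calc (L.take f).idxOf x < (L.take f).length := List.idxOf_lt_length_of_mem h
    _ ≤ f := by simp

-- idxOf over pre ++ a :: suf when a is not in pre
lemma idxOf_append_cons (pre : List String) (a : String) (suf : List String) (h : a ∉ pre) :
    (pre ++ a :: suf).idxOf a = pre.length := by
  induction pre with
  | nil => simp
  | cons y t ih =>
    have hy : ¬ y = a := fun he => h (by simp [he])
    simp [hy, ih (fun hm => h (by simp [hm]))]

-- position f is a first occurrence iff its element is absent from the prefix before it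
lemma idxOf_getElem_eq_iff (L : List String) (f : Nat) (hf : f < L.length) :
    L.idxOf L[f] = f ↔ L[f] ∉ L.take f := by
  constructor
  · intro he hmem
    have := idxOf_lt_of_mem_take L L[f] f hmem
    omega
  · intro hmem
    have h1 : L.idxOf L[f] = (L.take f ++ L[f] :: L.drop (f + 1)).idxOf L[f] := by
      rw [← List.drop_eq_getElem_cons hf, List.take_append_drop]
    rw [h1, idxOf_append_cons _ _ _ hmem, List.length_take]
    omega

-- appending one element to the dedup source
lemma dedup_append_singleton (M : List String) (a : String) :
    PySem.List.dedup (M ++ [a]) = PySem.Set.add (PySem.List.dedup M) a := by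
  simp [PySem.List.dedup_eq_ofList, PySem.Set.ofList_eq_foldl]

-- rank of an element in the dedup list = number of distinct values before its first occurrence
lemma dedup_idxOf_eq (L : List String) (x : String) (hx : x ∈ L) :
    (PySem.List.dedup L).idxOf x = (PySem.List.dedup (L.take (L.idxOf x))).length := by
  have hf : L.idxOf x < L.length := List.idxOf_lt_length_of_mem hx
  have hget : L[L.idxOf x] = x := List.getElem_idxOf hf
  have hnm : x ∉ L.take (L.idxOf x) := by
    intro hmem
    have := idxOf_lt_of_mem_take L x _ hmem
    omega
  have hnd : x ∉ PySem.List.dedup (L.take (L.idxOf x)) := by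
    simpa [PySem.List.mem_dedup] using hnm
  have hsplit : L = L.take (L.idxOf x) ++ x :: L.drop (L.idxOf x + 1) := by
    conv_lhs => rw [← List.take_append_drop (L.idxOf x) L, List.drop_eq_getElem_cons hf]
    rw [hget]
  rw [PySem.List.dedup_eq_ofList, PySem.Set.ofList_eq_foldl]
  conv_lhs => rw [hsplit]
  rw [List.foldl_append, List.foldl_cons]
  have hfold : (L.take (L.idxOf x)).foldl PySem.Set.add [] = PySem.List.dedup (L.take (L.idxOf x)) := by
    rw [PySem.List.dedup_eq_ofList, PySem.Set.ofList_eq_foldl]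
  rw [hfold]
  have hadd : PySem.Set.add (PySem.List.dedup (L.take (L.idxOf x))) x
      = PySem.List.dedup (L.take (L.idxOf x)) ++ [x] := by
    simp [PySem.Set.add, PySem.Set.contains, hnm]
  rw [hadd, idxOf_foldl_add_of_mem _ _ (by simp), idxOf_append_self hnd]

-- the count in B's remap = number of distinct values in the prefix
lemma countP_first_eq (L : List String) (f : Nat) (hf : f ≤ L.length) :
    (List.range f).countP
        (fun (j : Nat) => PySem.List.pyGetD (L.map (fun nm => ((L.idxOf nm : Nat) : Int))) ((j : Nat) : Int) 0 == ((j : Nat) : Int))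
      = (PySem.List.dedup (L.take f)).length := by
  induction f with
  | zero => simp
  | succ f ih =>
    have hflt : f < L.length := by omega
    rw [List.range_succ, List.countP_append, ih (by omega),
      List.take_succ_eq_append_getElem hflt, dedup_append_singleton]
    have hp : PySem.List.pyGetD (L.map (fun nm => ((L.idxOf nm : Nat) : Int))) (f : Int) 0
        = ((L.idxOf L[f] : Nat) : Int) := first_getD L f hflt
    by_cases hmem : L[f] ∈ L.take f
    · have hne : L.idxOf L[f] ≠ f := by
        have := idxOf_lt_of_mem_take L L[f] f hmem
        omega
      have hmemd : L[f] ∈ PySem.List.dedup (L.take f) := by rw [PySem.List.mem_dedup]; exact hmem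
      have hadd : PySem.Set.add (PySem.List.dedup (L.take f)) L[f] = PySem.List.dedup (L.take f) := by
        simp [PySem.Set.add, PySem.Set.contains, hmem]
      have hpred : (((L.idxOf L[f] : Nat) : Int) == ((f : Nat) : Int)) = false := by
        simp [hne]
      rw [hadd, List.countP_cons, List.countP_nil, hp, hpred]
      simp
    · have heq : L.idxOf L[f] = f := (idxOf_getElem_eq_iff L f hflt).mpr hmem
      have hmemd : L[f] ∉ PySem.List.dedup (L.take f) := by rw [PySem.List.mem_dedup]; exact hmem
      have hadd : PySem.Set.add (PySem.List.dedup (L.take f)) L[f]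
          = PySem.List.dedup (L.take f) ++ [L[f]] := by
        simp [PySem.Set.add, PySem.Set.contains, hmem]
      have hpred : (((L.idxOf L[f] : Nat) : Int) == ((f : Nat) : Int)) = true := by
        simp [heq]
      rw [hadd, List.countP_cons, List.countP_nil, hp, hpred]
      simp

-- B's new_names comprehension builds the dedup list
lemma newnames_eq (L : List String) :
    ((PySem.List.enumerate L).filter
        (fun p => PySem.List.pyGetD (L.map (fun nm => ((L.idxOf nm : Nat) : Int))) p.1 0 == p.1)).map
        (fun p => p.2)
      = PySem.List.dedup L := by
  induction L using List.reverseRecOn with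
  | nil => rfl
  | append_singleton M a ih =>
    rw [PySem.List.enumerate_append, List.filter_append, List.map_append,
      dedup_append_singleton]
    have hone : PySem.List.enumerate [a] (0 + (M.length : Int)) = [((M.length : Int), a)] := by
      rw [PySem.List.enumerate_cons, PySem.List.enumerate_nil]
      norm_num
    rw [hone]
    have hM : ∀ p ∈ PySem.List.enumerate M 0,
        (PySem.List.pyGetD ((M ++ [a]).map (fun nm => (((M ++ [a]).idxOf nm : Nat) : Int))) p.1 0 == p.1)
          = (PySem.List.pyGetD (M.map (fun nm => ((M.idxOf nm : Nat) : Int))) p.1 0 == p.1) := by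
      intro p hp
      obtain ⟨k, hk, rfl⟩ := (PySem.List.mem_enumerate_iff M 0 p).mp hp
      have hk' : k < (M ++ [a]).length := by simp; omega
      have hgl : (M ++ [a])[k] = M[k] := List.getElem_append_left hk
      simp only [zero_add]
      rw [first_getD (M ++ [a]) k hk', first_getD M k hk, hgl,
        List.idxOf_append_of_mem (List.getElem_mem hk)]
    rw [List.filter_congr hM]
    have hlast : (M ++ [a])[M.length]'(by simp) = a := by simp
    have hfl : PySem.List.pyGetD ((M ++ [a]).map (fun nm => (((M ++ [a]).idxOf nm : Nat) : Int)))
          ((M.length : Nat) : Int) 0 = (((M ++ [a]).idxOf a : Nat) : Int) := by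
      have h := first_getD (M ++ [a]) M.length (by simp)
      rwa [hlast] at h
    by_cases hmem : a ∈ M
    · have hlt : (M ++ [a]).idxOf a < M.length := by
        rw [List.idxOf_append_of_mem hmem]
        exact List.idxOf_lt_length_of_mem hmem
      have hpred : (PySem.List.pyGetD ((M ++ [a]).map (fun nm => (((M ++ [a]).idxOf nm : Nat) : Int)))
          ((M.length : Nat) : Int) 0 == ((M.length : Nat) : Int)) = false := by
        rw [hfl]
        simp
        omega
      have hadd : PySem.Set.add (PySem.List.dedup M) a = PySem.List.dedup M := by
        have hmd : a ∈ PySem.List.dedup M := by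
          have := (PySem.List.mem_dedup (xs := M) (x := a)).mpr hmem
          exact this
        simp [PySem.Set.add, PySem.Set.contains, hmem]
      rw [hadd, List.filter_cons, hpred]
      simpa using ih
    · have hidx : (M ++ [a]).idxOf a = M.length := by
        rw [List.idxOf_append]
        simp [hmem]
      have hpred : (PySem.List.pyGetD ((M ++ [a]).map (fun nm => (((M ++ [a]).idxOf nm : Nat) : Int)))
          ((M.length : Nat) : Int) 0 == ((M.length : Nat) : Int)) = true := by
        rw [hfl, hidx]
        simp
      have hadd : PySem.Set.add (PySem.List.dedup M) a = PySem.List.dedup M ++ [a] := by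
        have hmd : a ∉ PySem.List.dedup M := by
          intro hmd
          exact hmem ((PySem.List.mem_dedup (xs := M) (x := a)).mp hmd)
        simp [PySem.Set.add, PySem.Set.contains, hmem]
      rw [hadd, List.filter_cons, hpred]
      simp [ih]

-- B's remap dict items, spelled out
lemma b_remap_items (first : List Int) (n : Int) :
    ((PySem.List.pyRange 0 n 1).foldl
        (fun (d : PySem.Dict Int Int) i =>
          d.insert i ((PySem.List.pyRange 0 (PySem.List.pyGetD first i 0) 1).foldl
            (fun acc j => if PySem.List.pyGetD first j 0 == j then acc + 1 else acc) (0 : Int)))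
        PySem.Dict.empty).items
      = (PySem.List.pyRange 0 n 1).map
        (fun i => (i, (PySem.List.pyRange 0 (PySem.List.pyGetD first i 0) 1).foldl
            (fun acc j => if PySem.List.pyGetD first j 0 == j then acc + 1 else acc) (0 : Int))) := by
  have h := PySem.Dict.items_foldl_insert_fresh (PySem.List.pyRange 0 n 1)
    (fun i => i)
    (fun i => (PySem.List.pyRange 0 (PySem.List.pyGetD first i 0) 1).foldl
        (fun acc j => if PySem.List.pyGetD first j 0 == j then acc + 1 else acc) (0 : Int))
    PySem.Dict.empty (by intro a _; simp)
    (by simpa using PySem.List.nodup_pyRange_one 0 n)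
  simpa using h

-- ===== VERDICT (by name: the statement is the Claim_ definition above) =====
theorem build_names_and_remap_spec : Claim_equal_build_names_and_remap := by
  intro old_names _
  unfold Spec_build_names_and_remap
  obtain ⟨h1, h2⟩ := aLoop_inv old_names 0 PySem.Dict.empty [] PySem.Dict.empty
    List.nodup_nil (by intro n; simp [PySem.Dict.get?_empty])
    (by intro k hk; simp [PySem.Dict.keys_empty] at hk)
  have hS : (old_names.map normalize_label_name).foldl PySem.Set.add [] =
      PySem.List.dedup (old_names.map normalize_label_name) := by
    rw [PySem.List.dedup_eq_ofList, PySem.Set.ofList_eq_foldl]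
  have hA : build_names_and_remap old_names =
      (PySem.List.dedup (old_names.map normalize_label_name),
        (PySem.List.enumerate (old_names.map normalize_label_name)).map
          (fun p => (p.1, ((PySem.List.dedup (old_names.map normalize_label_name)).idxOf p.2 : Int)))) := by
    show (((PySem.List.enumerate old_names).foldl aStep
        (PySem.Dict.empty, [], PySem.Dict.empty)).2.1,
      ((PySem.List.enumerate old_names).foldl aStep
        (PySem.Dict.empty, [], PySem.Dict.empty)).2.2.items) = _
    rw [h1, h2, hS]
    have hemp : (PySem.Dict.empty : PySem.Dict Int Int).items = [] := rfl
    rw [hemp, List.nil_append]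
  rw [hA]
  show _ =
    (((PySem.List.enumerate (old_names.map normalize_label_name)).filter
        (fun p => PySem.List.pyGetD ((old_names.map normalize_label_name).map
          (fun nm => (((PySem.List.index? (old_names.map normalize_label_name) nm).getD 0 : Nat) : Int))) p.1 0 == p.1)).map
        (fun p => p.2),
      ((PySem.List.pyRange 0 (PySem.List.len (old_names.map normalize_label_name)) 1).foldl
        (fun (d : PySem.Dict Int Int) i =>
          d.insert i ((PySem.List.pyRange 0 (PySem.List.pyGetD ((old_names.map normalize_label_name).map
              (fun nm => (((PySem.List.index? (old_names.map normalize_label_name) nm).getD 0 : Nat) : Int))) i 0) 1).foldl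
            (fun acc j => if PySem.List.pyGetD ((old_names.map normalize_label_name).map
                (fun nm => (((PySem.List.index? (old_names.map normalize_label_name) nm).getD 0 : Nat) : Int))) j 0 == j
              then acc + 1 else acc) (0 : Int)))
        PySem.Dict.empty).items)
  rw [first_eq, b_remap_items, newnames_eq]
  refine Prod.ext rfl ?_
  rw [PySem.List.enumerate_eq_map_pyRange (old_names.map normalize_label_name) "", List.map_map]
  apply List.map_congr_left
  intro i hi
  obtain ⟨h0, hlt⟩ := PySem.List.mem_pyRange_one.mp hi
  have hi' : i = ((i.toNat : Nat) : Int) := (Int.toNat_of_nonneg h0).symm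
  have hklt : i.toNat < (old_names.map normalize_label_name).length := by
    rw [PySem.List.len_eq] at hlt
    omega
  have hget : PySem.List.pyGetD (old_names.map normalize_label_name) i "" =
      (old_names.map normalize_label_name)[i.toNat] :=
    PySem.List.pyGetD_eq_getElem _ _ h0 (by rw [PySem.List.len_eq] at hlt; exact_mod_cast hlt)
  have hfirst : PySem.List.pyGetD ((old_names.map normalize_label_name).map
      (fun nm => (((old_names.map normalize_label_name).idxOf nm : Nat) : Int))) i 0
      = (((old_names.map normalize_label_name).idxOf (old_names.map normalize_label_name)[i.toNat] : Nat) : Int) := by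
    have h := first_getD (old_names.map normalize_label_name) i.toNat hklt
    rwa [← hi'] at h
  simp only [Function.comp_def, hget, hfirst]
  have hmemL : (old_names.map normalize_label_name)[i.toNat] ∈ old_names.map normalize_label_name :=
    List.getElem_mem hklt
  have hfle : (old_names.map normalize_label_name).idxOf (old_names.map normalize_label_name)[i.toNat]
      ≤ (old_names.map normalize_label_name).length :=
    le_of_lt (List.idxOf_lt_length_of_mem hmemL)
  rw [PySem.List.pyRange_zero_natCast, PySem.List.foldl_if_add_one, List.countP_map]
  have hcount := countP_first_eq (old_names.map normalize_label_name)
    ((old_names.map normalize_label_name).idxOf (old_names.map normalize_label_name)[i.toNat]) hfle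
  have hrank := dedup_idxOf_eq (old_names.map normalize_label_name)
    (old_names.map normalize_label_name)[i.toNat] hmemL
  refine Prod.ext rfl ?_
  show ((PySem.List.dedup (old_names.map normalize_label_name)).idxOf
      (old_names.map normalize_label_name)[i.toNat] : Int) = _
  rw [hrank, ← hcount]
  simp [Function.comp_def]
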